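-- pv_equiv track=rewrite | github.com/yeliu0930/Knowledge-guided-Open-Attribute-Value-Extraction-with-Reinforcement-Learning | qanet_model/databunch.py | ComputeAnswerIndex
-- ===== SOURCE A (Python) =====
-- maxPLen = 50
--
-- def ComputeAnswerIndex(tokens,answer,answers=None):
-- 	ret_start = [0] * (maxPLen)
-- 	ret_end = [0] * (maxPLen)
-- 	for i in range(len(tokens)):
-- 		if i >= maxPLen: break
-- 		tans=""
-- 		for j in range(i,len(tokens)):
-- 			if j >= maxPLen: break
-- 			tans += tokens[j]
-- 			if tans == answer:
-- 				ret_start[i]=1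
-- 				ret_end[j]=1
-- 			if (answers is not None) and (tans in answers):
-- 				ret_start[i]=1
-- 				ret_end[j]=1
-- 			#if len(tans) >= len(answer) * 2: break
-- 	return ret_start,ret_end
-- 	if sum(ret_start) == 0:
-- 		achrs = [set(answer)] + [] if answers is None else [set(a) for a in answers]
-- 		for i in range(len(tokens)):
-- 			if i >= maxPLen: break
-- 			tans = ""
-- 			for j in range(i,len(tokens)):
-- 				if j >= maxPLen: break
-- 				tans += tokens[j]
-- 				chrs = set(tans); vratio = 0
-- 				for aa in achrs:
-- 					vcomm = len(chrs.intersection(aa))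
-- 					vratio = max(vratio, vcomm / (len(chrs) + len(aa) - vcomm + 1e-10))
-- 				if vratio > 0.5 and vratio > ret_start[i] and vratio > ret_end[j]:
-- 					ret_start[i]=ret_end[j]=vratio
-- 				#if len(tans)>=len(answer) * 3: break
-- 	return ret_start,ret_end
-- ===== SOURCE B (Python) =====
-- maxPLen = 50
--
-- def ComputeAnswerIndex(tokens, answer, answers=None):
--     targets = [answer] + (answers if answers is not None else [])
--     n = min(len(tokens), maxPLen)
--     pref = [""]
--     for t in tokens[:n]:
--         pref.append(pref[-1] + t)
--     matches = [(i, j) for i in range(n) for j in range(i, n)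
--                if any(pref[i] + t == pref[j + 1] for t in targets)]
--     starts = [i for i, _ in matches]
--     ends = [j for _, j in matches]
--     return ([1 if i in starts else 0 for i in range(maxPLen)],
--             [1 if j in ends else 0 for j in range(maxPLen)])
-- ===== Notes on version B (the rewrite author's own statement) =====
-- stated objective: alternative
-- what changed: Replaces the imperative double loop that re-concatenates tokens and marks arrays in place with a declarative pipeline: a prefix-concatenation array built once, a comprehension over (i,j) pairs selecting matches by prefix equations pref[i]+target == pref[j+1], and the output vectors derived from the match set by membership.
import Mathlib
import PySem

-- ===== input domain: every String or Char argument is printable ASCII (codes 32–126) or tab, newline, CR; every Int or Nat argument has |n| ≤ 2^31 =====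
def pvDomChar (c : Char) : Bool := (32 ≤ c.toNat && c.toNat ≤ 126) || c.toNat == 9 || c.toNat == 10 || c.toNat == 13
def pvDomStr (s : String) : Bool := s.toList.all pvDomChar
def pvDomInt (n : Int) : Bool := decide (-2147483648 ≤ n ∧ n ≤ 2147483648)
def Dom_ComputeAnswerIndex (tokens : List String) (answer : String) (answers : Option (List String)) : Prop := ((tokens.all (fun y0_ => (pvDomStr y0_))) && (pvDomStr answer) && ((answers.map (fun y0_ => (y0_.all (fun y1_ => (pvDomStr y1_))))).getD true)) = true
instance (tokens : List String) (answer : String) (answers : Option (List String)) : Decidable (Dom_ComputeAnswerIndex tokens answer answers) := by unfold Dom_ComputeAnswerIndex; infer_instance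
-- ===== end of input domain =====

-- B replaces A's in-place-marking double loop with a prefix-concatenation array, a pair
-- comprehension selecting pairs, and membership-derived output vectors (alternative
-- decomposition, same asymptotic cost).


-- ===== PORT A =====
-- maxPLen = 50
def pvMaxPLen : Nat := 50

-- the two conditional markings of A's inner body
def pvAUpdate (answer : String) (answers : Option (List String)) (i j : Nat)
    (tans' : String) (rs re : List Int) : List Int × List Int :=
  let s1 := if tans' = answer then (rs.set i 1, re.set j 1) else (rs, re)
  match answers with
  | some as => if tans' ∈ as then (s1.1.set i 1, s1.2.set j 1) else s1
  | none => s1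

-- inner loop: 'for j in range(i, len(tokens)): if j >= maxPLen: break; tans += tokens[j]; …'
def pvAInner (tokens : List String) (answer : String) (answers : Option (List String))
    (i : Nat) (j : Nat) (tans : String) (rs re : List Int) : List Int × List Int :=
  if h : j < tokens.length then
    if pvMaxPLen ≤ j then (rs, re)    -- break
    else
      let tans' := tans ++ tokens[j]
      let s2 := pvAUpdate answer answers i j tans' rs re
      pvAInner tokens answer answers i (j + 1) tans' s2.1 s2.2
  else (rs, re)
termination_by tokens.length - j

-- outer loop: 'for i in range(len(tokens)): if i >= maxPLen: break; tans = ""; …'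
def pvAOuter (tokens : List String) (answer : String) (answers : Option (List String))
    (i : Nat) (rs re : List Int) : List Int × List Int :=
  if h : i < tokens.length then
    if pvMaxPLen ≤ i then (rs, re)    -- break
    else
      let s := pvAInner tokens answer answers i i "" rs re
      pvAOuter tokens answer answers (i + 1) s.1 s.2
  else (rs, re)
termination_by tokens.length - i

def ComputeAnswerIndex (tokens : List String) (answer : String) (answers : Option (List String)) :
    List Int × List Int :=
  pvAOuter tokens answer answers 0 (List.replicate pvMaxPLen 0) (List.replicate pvMaxPLen 0)

-- ===== PORT B =====
def ComputeAnswerIndex_alt (tokens : List String) (answer : String) (answers : Option (List String)) :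
    List Int × List Int :=
  let targets := answer :: (match answers with | some as => as | none => [])
  let n := min tokens.length pvMaxPLen
  -- 'pref = [""]; for t in tokens[:n]: pref.append(pref[-1] + t)' (a scan)
  let pref := List.scanl (fun s t => s ++ t) "" (tokens.take n)
  let pairs := (List.range n).flatMap (fun i =>
    ((List.range' i (n - i)).filter
        (fun j => targets.any (fun t => pref[i]! ++ t == pref[j + 1]!))).map (fun j => (i, j)))
  let starts : List Nat := pairs.map (·.1)
  let ends : List Nat := pairs.map (·.2)
  ((List.range pvMaxPLen).map (fun i => if i ∈ starts then (1 : Int) else 0),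
   (List.range pvMaxPLen).map (fun j => if j ∈ ends then (1 : Int) else 0))

-- ===== PRECONDITION & SPEC =====
def Spec_ComputeAnswerIndex (tokens : List String) (answer : String) (answers : Option (List String)) (out : List Int × List Int) : Prop := out = ComputeAnswerIndex_alt tokens answer answers
instance (tokens : List String) (answer : String) (answers : Option (List String)) (out : List Int × List Int) : Decidable (Spec_ComputeAnswerIndex tokens answer answers out) := by unfold Spec_ComputeAnswerIndex; infer_instance

-- ===== CLAIM (what is proved, stated in full; the proofs are below) =====
def Claim_equal_ComputeAnswerIndex : Prop := ∀ (tokens : List String) (answer : String) (answers : Option (List String)), Dom_ComputeAnswerIndex tokens answer answers → Spec_ComputeAnswerIndex tokens answer answers (ComputeAnswerIndex tokens answer answers)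

-- ===== LEMMAS AND PROOFS =====

-- the segment tokens[i:j+1] concatenated
def pvSeg (tokens : List String) (i j : Nat) : String :=
  String.join ((tokens.drop i).take (j + 1 - i))

-- the prefix tokens[i:j] concatenated (the inner loop's tans before processing j)
def pvPre (tokens : List String) (i j : Nat) : String :=
  String.join ((tokens.drop i).take (j - i))

-- the combined hit test of both programs
def pvHit (tokens : List String) (targets : List String) (i j : Nat) : Bool :=
  decide (pvSeg tokens i j ∈ targets)

def pvTargets (answer : String) (answers : Option (List String)) : List String :=
  answer :: (match answers with | some as => as | none => [])

-- any hit with start i and an end in [j, n)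
def pvAnyHitFrom (tokens : List String) (targets : List String) (n i j : Nat) : Bool :=
  (List.range' j (n - j)).any (fun j' => pvHit tokens targets i j')

-- any hit with a start in [i, n) and end k (< n)
def pvAnyEndFrom (tokens : List String) (targets : List String) (n i k : Nat) : Bool :=
  (List.range' i (n - i)).any
    (fun i' => decide (i' ≤ k) && decide (k < n) && pvHit tokens targets i' k)

theorem pvJoin_nil : String.join ([] : List String) = "" := rfl

theorem pvJoin_append_singleton (l : List String) (x : String) :
    String.join (l ++ [x]) = String.join l ++ x := by
  show (l ++ [x]).foldl (· ++ ·) "" = l.foldl (· ++ ·) "" ++ x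
  rw [List.foldl_append]
  rfl

theorem pvJoin_append (l m : List String) :
    String.join (l ++ m) = String.join l ++ String.join m := by
  induction m using List.reverseRecOn with
  | nil => simp [pvJoin_nil]
  | append_singleton ys y ih =>
      rw [← List.append_assoc, pvJoin_append_singleton, pvJoin_append_singleton, ih,
        String.append_assoc]

theorem pvJoin_cons (x : String) (l : List String) :
    String.join (x :: l) = x ++ String.join l := by
  have := pvJoin_append [x] l
  simpa using this

theorem pvPre_self (tokens : List String) (i : Nat) : pvPre tokens i i = "" := by
  simp [pvPre, pvJoin_nil]

theorem pvPre_step (tokens : List String) (i j : Nat) (hij : i ≤ j) (hj : j < tokens.length) :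
    pvPre tokens i j ++ tokens[j] = pvSeg tokens i j := by
  unfold pvPre pvSeg
  have h1 : j + 1 - i = (j - i) + 1 := by omega
  have hm : j - i < (tokens.drop i).length := by simp; omega
  rw [h1, List.take_add_one]
  have : (tokens.drop i)[j - i]? = some tokens[j] := by
    rw [List.getElem?_eq_getElem hm]
    congr 1
    rw [List.getElem_drop]
    congr 1
    omega
  rw [this]
  simp [pvJoin_append_singleton]

theorem pvString_append_left_cancel (s a b : String) (h : s ++ a = s ++ b) : a = b := by
  have := congrArg String.toList h
  simp at this
  exact String.toList_injective this

-- the two conditional updates of A's inner body collapse to one test against pvTargets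
theorem pvStep_collapse (tokens : List String) (answer : String) (answers : Option (List String))
    (i j : Nat) (rs re : List Int) (tans' : String) (hseg : tans' = pvSeg tokens i j) :
    pvAUpdate answer answers i j tans' rs re
      = if pvHit tokens (pvTargets answer answers) i j then (rs.set i 1, re.set j 1)
           else (rs, re) := by
  subst hseg
  unfold pvAUpdate
  cases answers with
  | none =>
      simp only [pvHit, pvTargets, List.mem_cons, List.not_mem_nil, or_false]
      by_cases h : pvSeg tokens i j = answer <;> simp [h]
  | some as =>
      simp only [pvHit, pvTargets, List.mem_cons]
      by_cases h1 : pvSeg tokens i j = answer <;>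
        by_cases h2 : pvSeg tokens i j ∈ as <;>
          simp [h1, h2, List.set_set]

-- ===== characterization of A's inner loop =====
theorem pvAInner_stop (tokens : List String) (answer : String) (answers : Option (List String))
    (i j : Nat) (tans : String) (rs re : List Int)
    (h : min tokens.length pvMaxPLen ≤ j) :
    pvAInner tokens answer answers i j tans rs re = (rs, re) := by
  rw [pvAInner]
  by_cases h1 : j < tokens.length
  · have h2 : pvMaxPLen ≤ j := by omega
    simp [h1, h2]
  · simp [h1]

theorem pvAnyHitFrom_stop (tokens : List String) (targets : List String) (n i j : Nat)
    (h : n ≤ j) : pvAnyHitFrom tokens targets n i j = false := by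
  unfold pvAnyHitFrom
  have : n - j = 0 := by omega
  simp [this]

theorem pvAInner_char (tokens : List String) (answer : String) (answers : Option (List String))
    (i : Nat) :
    ∀ (d j : Nat) (rs re : List Int), tokens.length - j ≤ d → i ≤ j →
      re.length = pvMaxPLen →
      (pvAInner tokens answer answers i j (pvPre tokens i j) rs re).1
          = (if pvAnyHitFrom tokens (pvTargets answer answers)
                (min tokens.length pvMaxPLen) i j then rs.set i 1 else rs)
        ∧ (pvAInner tokens answer answers i j (pvPre tokens i j) rs re).2.length = re.length
        ∧ ∀ k, (pvAInner tokens answer answers i j (pvPre tokens i j) rs re).2[k]?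
            = if (decide (j ≤ k) && decide (k < min tokens.length pvMaxPLen)
                  && pvHit tokens (pvTargets answer answers) i k)
              then some 1 else re[k]? := by
  intro d
  induction d with
  | zero =>
      intro j rs re hd _ _
      rw [pvAInner_stop tokens answer answers i j _ rs re (by omega)]
      refine ⟨?_, rfl, fun k => ?_⟩
      · rw [pvAnyHitFrom_stop tokens _ _ i j (by omega)]
        simp
      · rw [if_neg]
        simp only [Bool.and_eq_true, decide_eq_true_eq, not_and]
        rintro ⟨h2, h3⟩
        omega
  | succ d ih =>
      intro j rs re hd hij hre
      by_cases hjn : min tokens.length pvMaxPLen ≤ j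
      · rw [pvAInner_stop tokens answer answers i j _ rs re hjn]
        refine ⟨?_, rfl, fun k => ?_⟩
        · rw [pvAnyHitFrom_stop tokens _ _ i j hjn]
          simp
        · rw [if_neg]
          simp only [Bool.and_eq_true, decide_eq_true_eq, not_and]
          rintro ⟨h2, h3⟩
          omega
      · -- loop body runs: j < len and j < 50
        have hjlen : j < tokens.length := by omega
        have hj50 : ¬ pvMaxPLen ≤ j := by omega
        rw [pvAInner]
        simp only [hjlen, dif_pos, hj50, if_neg, not_false_iff]
        rw [pvPre_step tokens i j hij hjlen]
        rw [pvStep_collapse tokens answer answers i j rs re _ rfl]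
        set tg := pvTargets answer answers with htg
        set n := min tokens.length pvMaxPLen with hn
        have hjn' : j < n := by omega
        have hsplit : pvAnyHitFrom tokens tg n i j
            = (pvHit tokens tg i j || pvAnyHitFrom tokens tg n i (j + 1)) := by
          unfold pvAnyHitFrom
          have h5 : n - j = (n - (j + 1)) + 1 := by omega
          rw [h5, List.range'_succ]
          simp
        have hpre' : pvSeg tokens i j = pvPre tokens i (j + 1) := rfl
        by_cases hh : pvHit tokens tg i j
        · simp only [hh, if_pos]
          have hre' : (re.set j 1).length = pvMaxPLen := by simp [hre]
          obtain ⟨c1, c2, c3⟩ := ih (j + 1) (rs.set i 1) (re.set j 1)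
            (by omega) (by omega) hre'
          rw [hpre']
          refine ⟨?_, by rw [c2]; simp [hre], fun k => ?_⟩
          · rw [c1, hsplit, hh]
            simp only [Bool.true_or, if_pos]
            by_cases h2 : pvAnyHitFrom tokens tg n i (j + 1) <;>
              simp [h2, List.set_set]
          · rw [c3 k]
            by_cases hk : k = j
            · subst hk
              have hc1 : ¬ ((decide (k + 1 ≤ k) && decide (k < n) && pvHit tokens tg i k) = true) := by
                simp only [Bool.and_eq_true, decide_eq_true_eq]
                rintro ⟨⟨h2, h3⟩, -⟩
                omega
              rw [if_neg hc1]
              have hklen : k < re.length := by omega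
              have hc2 : (decide (k ≤ k) && decide (k < n) && pvHit tokens tg i k) = true := by
                simp only [Bool.and_eq_true, decide_eq_true_eq]
                exact ⟨⟨le_refl k, hjn'⟩, hh⟩
              rw [if_pos hc2]
              rw [List.getElem?_set_self hklen]
            · rw [List.getElem?_set_ne (by omega)]
              congr 1
              by_cases h1 : j ≤ k
              · have h6 : j + 1 ≤ k := by omega
                simp [h1, h6]
              · have h6 : ¬ (j + 1 ≤ k) := by omega
                simp [h1, h6]
        · simp only [hh, if_neg, not_false_iff, Bool.false_eq_true]
          replace hh : pvHit tokens tg i j = false := by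
            simpa using hh
          obtain ⟨c1, c2, c3⟩ := ih (j + 1) rs re (by omega) (by omega) hre
          rw [hpre']
          refine ⟨?_, c2, fun k => ?_⟩
          · rw [c1, hsplit, hh]
            simp
          · rw [c3 k]
            congr 1
            by_cases hk : k = j
            · subst hk
              have h1 : ¬ (k + 1 ≤ k) := by omega
              simp [h1, hh]
            · by_cases h1 : j ≤ k
              · have h6 : j + 1 ≤ k := by omega
                simp [h1, h6]
              · have h6 : ¬ (j + 1 ≤ k) := by omega
                simp [h1, h6]

-- ===== characterization of A's outer loop =====
theorem pvAOuter_stop (tokens : List String) (answer : String) (answers : Option (List String))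
    (i : Nat) (rs re : List Int) (h : min tokens.length pvMaxPLen ≤ i) :
    pvAOuter tokens answer answers i rs re = (rs, re) := by
  rw [pvAOuter]
  by_cases h1 : i < tokens.length
  · have h2 : pvMaxPLen ≤ i := by omega
    simp [h1, h2]
  · simp [h1]

theorem pvAnyEndFrom_stop (tokens : List String) (targets : List String) (n i k : Nat)
    (h : n ≤ i) : pvAnyEndFrom tokens targets n i k = false := by
  unfold pvAnyEndFrom
  have : n - i = 0 := by omega
  simp [this]

theorem pvAOuter_char (tokens : List String) (answer : String) (answers : Option (List String)) :
    ∀ (d i : Nat) (rs re : List Int), tokens.length - i ≤ d →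
      rs.length = pvMaxPLen → re.length = pvMaxPLen →
      (∀ k, (pvAOuter tokens answer answers i rs re).1[k]?
          = if (decide (i ≤ k) && decide (k < min tokens.length pvMaxPLen)
                && pvAnyHitFrom tokens (pvTargets answer answers)
                    (min tokens.length pvMaxPLen) k k)
            then some 1 else rs[k]?)
      ∧ (∀ k, (pvAOuter tokens answer answers i rs re).2[k]?
          = if pvAnyEndFrom tokens (pvTargets answer answers)
                (min tokens.length pvMaxPLen) i k
            then some 1 else re[k]?) := by
  intro d
  induction d with
  | zero =>
      intro i rs re hd _ _
      rw [pvAOuter_stop tokens answer answers i rs re (by omega)]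
      refine ⟨fun k => ?_, fun k => ?_⟩
      · rw [if_neg]
        simp only [Bool.and_eq_true, decide_eq_true_eq, not_and]
        rintro ⟨h2, h3⟩
        omega
      · rw [pvAnyEndFrom_stop tokens _ _ i k (by omega)]
        simp
  | succ d ih =>
      intro i rs re hd hrs hre
      by_cases hin : min tokens.length pvMaxPLen ≤ i
      · rw [pvAOuter_stop tokens answer answers i rs re hin]
        refine ⟨fun k => ?_, fun k => ?_⟩
        · rw [if_neg]
          simp only [Bool.and_eq_true, decide_eq_true_eq, not_and]
          rintro ⟨h2, h3⟩
          omega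
        · rw [pvAnyEndFrom_stop tokens _ _ i k hin]
          simp
      · have hilen : i < tokens.length := by omega
        have hi50 : ¬ pvMaxPLen ≤ i := by omega
        rw [pvAOuter]
        simp only [hilen, dif_pos, hi50, if_neg, not_false_iff]
        set tg := pvTargets answer answers with htg
        set n := min tokens.length pvMaxPLen with hn
        have hin' : i < n := by omega
        -- the inner call, with "" = pvPre tokens i i
        have hpre0 : ("" : String) = pvPre tokens i i := (pvPre_self tokens i).symm
        rw [hpre0]
        obtain ⟨c1, c2, c3⟩ := pvAInner_char tokens answer answers i tokens.length i rs re
          (by omega) (le_refl i) hre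
        rw [← htg, ← hn] at c1 c3
        set inner := pvAInner tokens answer answers i i (pvPre tokens i i) rs re with hinner
        have hrs' : inner.1.length = pvMaxPLen := by
          rw [c1]
          by_cases h2 : pvAnyHitFrom tokens tg n i i <;> simp [h2, hrs]
        have hre' : inner.2.length = pvMaxPLen := by rw [c2, hre]
        obtain ⟨o1, o2⟩ := ih (i + 1) inner.1 inner.2 (by omega) hrs' hre'
        have hsplitE : ∀ k, pvAnyEndFrom tokens tg n i k
            = ((decide (i ≤ k) && decide (k < n) && pvHit tokens tg i k)
                || pvAnyEndFrom tokens tg n (i + 1) k) := by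
          intro k
          unfold pvAnyEndFrom
          have h5 : n - i = (n - (i + 1)) + 1 := by omega
          rw [h5, List.range'_succ]
          simp
        refine ⟨fun k => ?_, fun k => ?_⟩
        · rw [o1 k]
          by_cases hk : k = i
          · subst hk
            have hc1 : ¬ ((decide (k + 1 ≤ k) && decide (k < n)
                && pvAnyHitFrom tokens tg n k k) = true) := by
              simp only [Bool.and_eq_true, decide_eq_true_eq]
              rintro ⟨⟨h2, h3⟩, -⟩
              omega
            rw [if_neg hc1, c1]
            by_cases h2 : pvAnyHitFrom tokens tg n k k
            · have hklen : k < rs.length := by omega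
              rw [if_pos (by simp [h2])]
              simp [h2, List.getElem?_set_self hklen]
              exact fun h => absurd h (by omega)
            · have hc2 : ¬ ((decide (k ≤ k) && decide (k < n)
                  && pvAnyHitFrom tokens tg n k k) = true) := by
                simp [h2]
              rw [if_neg hc2]
              simp [h2]
          · have hrw : inner.1[k]? = rs[k]? := by
              rw [c1]
              by_cases h2 : pvAnyHitFrom tokens tg n i i
              · simp only [h2, if_pos]
                exact List.getElem?_set_ne (by omega)
              · simp [h2]
            rw [hrw]
            congr 1
            by_cases h1 : i ≤ k
            · have h6 : i + 1 ≤ k := by omega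
              simp [h1, h6]
            · have h6 : ¬ (i + 1 ≤ k) := by omega
              simp [h1, h6]
        · rw [o2 k, hsplitE k]
          rw [c3 k]
          by_cases h2 : (decide (i ≤ k) && decide (k < n) && pvHit tokens tg i k) = true
          · simp only [h2, Bool.true_or, if_pos]
            by_cases h3 : pvAnyEndFrom tokens tg n (i + 1) k <;> simp [h3]
          · simp only [h2, Bool.false_or]
            simp

-- ===== B-side lemmas =====
theorem pvScanl_get? (l : List String) :
    ∀ (s : String) (k : Nat), k ≤ l.length →
      (List.scanl (fun a b => a ++ b) s l)[k]? = some (s ++ String.join (l.take k)) := by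
  induction l with
  | nil =>
      intro s k hk
      have hk0 : k = 0 := by simpa using hk
      subst hk0
      simp [pvJoin_nil]
  | cons x xs ih =>
      intro s k hk
      rw [List.scanl_cons]
      cases k with
      | zero => simp [pvJoin_nil]
      | succ k =>
          simp only [List.getElem?_cons_succ]
          rw [ih (s ++ x) k (by simpa using hk)]
          rw [List.take_succ_cons, pvJoin_cons, String.append_assoc]

theorem pvPref_get (tokens : List String) (n k : Nat) (hn : n ≤ tokens.length) (hk : k ≤ n) :
    (List.scanl (fun s t => s ++ t) "" (tokens.take n))[k]! = String.join (tokens.take k) := by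
  have hlen : (tokens.take n).length = n := by simp [hn]
  have h1 : (List.scanl (fun s t => s ++ t) "" (tokens.take n))[k]?
      = some ("" ++ String.join ((tokens.take n).take k)) := pvScanl_get? _ "" k (by omega)
  have h2 : (tokens.take n).take k = tokens.take k := by
    rw [List.take_take]
    congr 1
    omega
  rw [h2] at h1
  have h3 : ("" : String) ++ String.join (tokens.take k) = String.join (tokens.take k) := by simp
  rw [h3] at h1
  rw [List.getElem!_eq_getElem?_getD, h1]
  rfl

theorem pvPrefix_split (tokens : List String) (i j : Nat) (hij : i ≤ j) :
    String.join (tokens.take (j + 1))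
      = String.join (tokens.take i) ++ pvSeg tokens i j := by
  have h0 : tokens.take (j + 1) = (tokens.take (j + 1)).take i ++ (tokens.take (j + 1)).drop i :=
    (List.take_append_drop i _).symm
  rw [h0, pvJoin_append, List.take_take, List.drop_take]
  have h1 : min i (j + 1) = i := by omega
  rw [h1]
  rfl

theorem pvPred_eq (tokens : List String) (answer : String) (answers : Option (List String))
    (i j : Nat) (hij : i ≤ j) (hj : j < min tokens.length pvMaxPLen) :
    ((pvTargets answer answers).any (fun t =>
        (List.scanl (fun s t => s ++ t) "" (tokens.take (min tokens.length pvMaxPLen)))[i]! ++ t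
          == (List.scanl (fun s t => s ++ t) "" (tokens.take (min tokens.length pvMaxPLen)))[j + 1]!))
      = pvHit tokens (pvTargets answer answers) i j := by
  set n := min tokens.length pvMaxPLen with hn
  have hnlen : n ≤ tokens.length := by omega
  rw [pvPref_get tokens n i hnlen (by omega), pvPref_get tokens n (j + 1) hnlen (by omega)]
  have hsplit := pvPrefix_split tokens i j hij
  by_cases h : pvSeg tokens i j ∈ pvTargets answer answers
  · have h1 : pvHit tokens (pvTargets answer answers) i j = true := by
      simp [pvHit, h]
    rw [h1]
    rw [List.any_eq_true]
    exact ⟨pvSeg tokens i j, h, by rw [hsplit]; exact beq_self_eq_true _⟩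
  · have h1 : pvHit tokens (pvTargets answer answers) i j = false := by
      simp [pvHit, h]
    rw [h1]
    rw [List.any_eq_false]
    intro t ht
    simp only [beq_iff_eq, hsplit]
    intro heq
    exact h (by rwa [← pvString_append_left_cancel _ _ _ heq])

theorem pvMem_pairs_fst (n : Nat) (p : Nat → Nat → Bool) (k : Nat) :
    (k ∈ ((List.range n).flatMap (fun i =>
        ((List.range' i (n - i)).filter (p i)).map (fun j => (i, j)))).map
          (fun x => x.1))
      ↔ (k < n ∧ ∃ j, k ≤ j ∧ j < n ∧ p k j = true) := by
  simp only [List.mem_map, List.mem_flatMap, List.mem_filter, List.mem_range, List.mem_range'_1]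
  constructor
  · rintro ⟨x, ⟨i', hi', j', ⟨⟨hj1, hj2⟩, hp⟩, rfl⟩, rfl⟩
    exact ⟨hi', j', hj1, by omega, hp⟩
  · rintro ⟨hk, j, hj1, hj2, hp⟩
    exact ⟨(k, j), ⟨k, hk, j, ⟨⟨hj1, by omega⟩, hp⟩, rfl⟩, rfl⟩

theorem pvMem_pairs_snd (n : Nat) (p : Nat → Nat → Bool) (k : Nat) :
    (k ∈ ((List.range n).flatMap (fun i =>
        ((List.range' i (n - i)).filter (p i)).map (fun j => (i, j)))).map
          (fun x => x.2))
      ↔ (∃ i, i < n ∧ i ≤ k ∧ k < n ∧ p i k = true) := by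
  simp only [List.mem_map, List.mem_flatMap, List.mem_filter, List.mem_range, List.mem_range'_1]
  constructor
  · rintro ⟨x, ⟨i', hi', j', ⟨⟨hj1, hj2⟩, hp⟩, rfl⟩, rfl⟩
    exact ⟨i', hi', hj1, by omega, hp⟩
  · rintro ⟨i, hi, hik, hk, hp⟩
    exact ⟨(i, k), ⟨i, hi, k, ⟨⟨hik, by omega⟩, hp⟩, rfl⟩, rfl⟩

theorem pvAnyHitFrom_iff (tokens : List String) (targets : List String) (n k : Nat) :
    pvAnyHitFrom tokens targets n k k = true
      ↔ ∃ j, k ≤ j ∧ j < n ∧ pvHit tokens targets k j = true := by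
  unfold pvAnyHitFrom
  rw [List.any_eq_true]
  constructor
  · rintro ⟨j, hj, hp⟩
    rw [List.mem_range'_1] at hj
    exact ⟨j, hj.1, by omega, hp⟩
  · rintro ⟨j, h1, h2, hp⟩
    exact ⟨j, List.mem_range'_1.mpr ⟨h1, by omega⟩, hp⟩

theorem pvAnyEndFrom_iff (tokens : List String) (targets : List String) (n k : Nat) :
    pvAnyEndFrom tokens targets n 0 k = true
      ↔ ∃ i, i < n ∧ i ≤ k ∧ k < n ∧ pvHit tokens targets i k = true := by
  unfold pvAnyEndFrom
  rw [List.any_eq_true]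
  constructor
  · rintro ⟨i, hi, hp⟩
    rw [List.mem_range'_1] at hi
    simp only [Bool.and_eq_true, decide_eq_true_eq] at hp
    exact ⟨i, by omega, hp.1.1, hp.1.2, hp.2⟩
  · rintro ⟨i, h1, h2, h3, hp⟩
    refine ⟨i, List.mem_range'_1.mpr ⟨by omega, by omega⟩, ?_⟩
    simp [h2, h3, hp]

set_option maxHeartbeats 2000000 in
theorem ComputeAnswerIndex_spec' (tokens : List String) (answer : String)
    (answers : Option (List String)) :
    ComputeAnswerIndex tokens answer answers = ComputeAnswerIndex_alt tokens answer answers := by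
  obtain ⟨o1, o2⟩ := pvAOuter_char tokens answer answers tokens.length 0
    (List.replicate pvMaxPLen 0) (List.replicate pvMaxPLen 0) (by omega)
    (List.length_replicate) (List.length_replicate)
  set tg := pvTargets answer answers with htg
  set n := min tokens.length pvMaxPLen with hn
  have hn50 : n ≤ pvMaxPLen := by omega
  have halt : ComputeAnswerIndex_alt tokens answer answers =
      (((List.range pvMaxPLen).map (fun i => if i ∈ ((List.range n).flatMap (fun i =>
          ((List.range' i (n - i)).filter (fun j => tg.any (fun t =>
              (List.scanl (fun s t => s ++ t) "" (tokens.take n))[i]! ++ t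
                == (List.scanl (fun s t => s ++ t) "" (tokens.take n))[j + 1]!))).map
            (fun j => (i, j)))).map (fun x => x.1) then (1 : Int) else 0)),
       ((List.range pvMaxPLen).map (fun j => if j ∈ ((List.range n).flatMap (fun i =>
          ((List.range' i (n - i)).filter (fun j => tg.any (fun t =>
              (List.scanl (fun s t => s ++ t) "" (tokens.take n))[i]! ++ t
                == (List.scanl (fun s t => s ++ t) "" (tokens.take n))[j + 1]!))).map
            (fun j => (i, j)))).map (fun x => x.2) then (1 : Int) else 0))) := rfl
  rw [halt]
  have hA : ComputeAnswerIndex tokens answer answers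
      = pvAOuter tokens answer answers 0 (List.replicate pvMaxPLen 0)
          (List.replicate pvMaxPLen 0) := rfl
  rw [hA]
  rw [Prod.ext_iff]
  constructor
  · apply List.ext_getElem?
    intro k
    rw [o1 k, List.getElem?_map]
    have hiff : (k ∈ ((List.range n).flatMap (fun i =>
          ((List.range' i (n - i)).filter (fun j => tg.any (fun t =>
              (List.scanl (fun s t => s ++ t) "" (tokens.take n))[i]! ++ t
                == (List.scanl (fun s t => s ++ t) "" (tokens.take n))[j + 1]!))).map
            (fun j => (i, j)))).map (fun x => x.1))
        ↔ (k < n ∧ pvAnyHitFrom tokens tg n k k = true) := by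
      rw [pvMem_pairs_fst]
      constructor
      · rintro ⟨hk1, j, h1, h2, hp⟩
        refine ⟨hk1, (pvAnyHitFrom_iff tokens tg n k).mpr ⟨j, h1, h2, ?_⟩⟩
        rw [← pvPred_eq tokens answer answers k j h1 h2]
        exact hp
      · rintro ⟨hk1, hany⟩
        obtain ⟨j, h1, h2, hp⟩ := (pvAnyHitFrom_iff tokens tg n k).mp hany
        refine ⟨hk1, j, h1, h2, ?_⟩
        rw [pvPred_eq tokens answer answers k j h1 h2]
        exact hp
    by_cases hk : k < pvMaxPLen
    · rw [List.getElem?_range hk]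
      by_cases hc : k < n ∧ pvAnyHitFrom tokens tg n k k = true
      · have e1 : (decide (0 ≤ k) && decide (k < n) && pvAnyHitFrom tokens tg n k k) = true := by
          simp [hc.1, hc.2]
        rw [if_pos e1]
        simp only [Option.map_some]
        rw [if_pos (hiff.mpr hc)]
      · have hb : (decide (0 ≤ k) && decide (k < n) && pvAnyHitFrom tokens tg n k k) = false := by
          by_cases h1 : k < n
          · have h2 : pvAnyHitFrom tokens tg n k k = false := by
              cases h2 : pvAnyHitFrom tokens tg n k k
              · rfl
              · exact absurd ⟨h1, h2⟩ hc
            simp [h2]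
          · simp [h1]
        rw [if_neg (by rw [hb]; exact Bool.false_ne_true)]
        rw [List.getElem?_replicate]
        simp only [if_pos hk, Option.map_some]
        rw [if_neg (fun hmem => hc (hiff.mp hmem))]
    · have hb : (decide (0 ≤ k) && decide (k < n) && pvAnyHitFrom tokens tg n k k) = false := by
        have h1 : ¬ k < n := by omega
        simp [h1]
      have e2 : (List.replicate pvMaxPLen (0 : Int))[k]? = none := by
        rw [List.getElem?_replicate, if_neg hk]
      have e3 : (List.range pvMaxPLen)[k]? = none :=
        List.getElem?_eq_none (by simpa using hk)
      rw [if_neg (by rw [hb]; exact Bool.false_ne_true), e2, e3]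
      simp only [Option.map_none]
  · apply List.ext_getElem?
    intro k
    rw [o2 k, List.getElem?_map]
    have hiff : (k ∈ ((List.range n).flatMap (fun i =>
          ((List.range' i (n - i)).filter (fun j => tg.any (fun t =>
              (List.scanl (fun s t => s ++ t) "" (tokens.take n))[i]! ++ t
                == (List.scanl (fun s t => s ++ t) "" (tokens.take n))[j + 1]!))).map
            (fun j => (i, j)))).map (fun x => x.2))
        ↔ pvAnyEndFrom tokens tg n 0 k = true := by
      rw [pvMem_pairs_snd, pvAnyEndFrom_iff]
      constructor
      · rintro ⟨i, hi, hik, hk, hp⟩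
        refine ⟨i, hi, hik, hk, ?_⟩
        rw [← pvPred_eq tokens answer answers i k hik hk]
        exact hp
      · rintro ⟨i, hi, hik, hk, hp⟩
        refine ⟨i, hi, hik, hk, ?_⟩
        rw [pvPred_eq tokens answer answers i k hik hk]
        exact hp
    by_cases hk : k < pvMaxPLen
    · rw [List.getElem?_range hk]
      cases hc : pvAnyEndFrom tokens tg n 0 k
      · rw [if_neg Bool.false_ne_true]
        rw [List.getElem?_replicate]
        simp only [if_pos hk, Option.map_some]
        rw [if_neg (fun hmem => absurd (hiff.mp hmem) (by simp [hc]))]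
      · rw [if_pos rfl]
        simp only [Option.map_some]
        rw [if_pos (hiff.mpr hc)]
    · have hcf : pvAnyEndFrom tokens tg n 0 k = false := by
        unfold pvAnyEndFrom
        simp only [List.any_eq_false, Bool.and_eq_true, decide_eq_true_eq, not_and]
        intro i hi
        rintro ⟨-, h2⟩
        omega
      have e2 : (List.replicate pvMaxPLen (0 : Int))[k]? = none := by
        rw [List.getElem?_replicate, if_neg hk]
      have e3 : (List.range pvMaxPLen)[k]? = none :=
        List.getElem?_eq_none (by simpa using hk)
      rw [if_neg (by rw [hcf]; exact Bool.false_ne_true), e2, e3]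
      simp only [Option.map_none]

-- ===== VERDICT (by name: the statement is the Claim_ definition above) =====
theorem ComputeAnswerIndex_spec : Claim_equal_ComputeAnswerIndex := by
  intro tokens answer answers _
  exact ComputeAnswerIndex_spec' tokens answer answers
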